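-- pv_equiv track=rewrite | github.com/MrBrantCode/unitest_baseline | mut_generate/mist_train_taco/taco_11116/solution.py | find_smallest_segment_set
-- ===== SOURCE A (Python) =====
-- def find_smallest_segment_set(n, k, segments):
--     # Flatten the segments into a list of endpoints with markers
--     endpoints = []
--     for li, ri in segments:
--         endpoints.append(2 * li)
--         endpoints.append(2 * ri + 1)
--
--     # Sort the endpoints
--     endpoints.sort()
--
--     # Initialize counters and result variables
--     c = 0
--     tot = []
--     res = None
--
--     # Process each endpoint
--     for x in endpoints:
--         i = x % 2
--         x = x // 2
--         if i == 0:
--             c += 1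
--             if c == k and res is None:
--                 res = x
--         else:
--             c -= 1
--             if c == k - 1 and res is not None:
--                 tot.append((res, x))
--                 res = None
--
--     # Return the result
--     return len(tot), tot
-- ===== SOURCE B (Python) =====
-- def find_smallest_segment_set(n, k, segments):
--     # Stateless rank-counting: no encoded event list and no running coverage
--     # counter.  For each distinct coordinate x, the coverage just left of x,
--     # at x, and just right of x is computed directly from global counts; the
--     # result intervals are the upward threshold crossings zipped with the
--     # downward ones (a crossing pending at +infinity is dropped by zip, a
--     # downward crossing before any upward one is popped).
--     coords = sorted({c for seg in segments for c in seg})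
--     lefts = []
--     rights = []
--     for x in coords:
--         below_l = sum(1 for l, _ in segments if l < x)
--         below_r = sum(1 for _, r in segments if r < x)
--         upto_l = sum(1 for l, _ in segments if l <= x)
--         upto_r = sum(1 for _, r in segments if r <= x)
--         before = below_l - below_r   # coverage just left of x
--         at = upto_l - below_r        # coverage at x
--         after = upto_l - upto_r      # coverage just right of x
--         if before < k <= at:
--             lefts.append(x)
--         if after < k <= at:
--             rights.append(x)
--     if rights and (not lefts or rights[0] < lefts[0]):
--         rights.pop(0)
--     tot = list(zip(lefts, rights))
--     return len(tot), tot
-- ===== Notes on version B (the rewrite author's own statement) =====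
-- stated objective: alternative
-- what changed: A encodes each endpoint as 2*l / 2*r+1, sorts the flat event list and runs a stateful open/close sweep with a running coverage counter; B keeps no event list and no running counter: for each distinct coordinate it computes the coverage level just left of / at / just right of that coordinate directly from global endpoint counts, collects the upward and downward threshold crossings as two lists, and pairs them with zip (popping a downward crossing that precedes every upward one).
import Mathlib
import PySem

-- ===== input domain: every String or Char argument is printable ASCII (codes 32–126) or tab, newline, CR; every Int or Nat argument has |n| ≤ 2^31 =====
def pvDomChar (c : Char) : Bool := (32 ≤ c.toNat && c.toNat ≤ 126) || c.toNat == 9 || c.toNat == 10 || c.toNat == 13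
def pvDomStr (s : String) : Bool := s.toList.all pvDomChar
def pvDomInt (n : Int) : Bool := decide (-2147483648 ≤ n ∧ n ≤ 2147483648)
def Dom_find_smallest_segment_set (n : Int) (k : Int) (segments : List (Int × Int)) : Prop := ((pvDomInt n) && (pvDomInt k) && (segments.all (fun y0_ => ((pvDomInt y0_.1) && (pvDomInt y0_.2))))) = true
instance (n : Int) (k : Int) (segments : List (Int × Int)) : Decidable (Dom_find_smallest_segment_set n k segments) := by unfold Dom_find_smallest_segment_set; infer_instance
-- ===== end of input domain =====

-- B replaces A's sorted encoded-event sweep (running coverage counter with an open/close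
-- state machine) by stateless per-coordinate rank counting: coverage left of / at / right of
-- each distinct coordinate from global counts, threshold crossings paired by zip (alternative).


-- ===== PORT A =====
-- one event of A's sweep over the sorted encoded endpoints
def pvStepA (k : Int) (st : Int × Option Int × List (Int × Int)) (x : Int) :
    Int × Option Int × List (Int × Int) :=
  let i := PySem.Int.mod x 2
  let x := PySem.Int.floordiv x 2
  let c := st.1; let res := st.2.1; let tot := st.2.2
  if i = 0 then
    let c := c + 1
    if c = k ∧ res = none then (c, some x, tot) else (c, res, tot)
  else
    let c := c - 1
    if c = k - 1 ∧ res ≠ none then (c, none, tot ++ [(res.get!, x)]) else (c, res, tot)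

def find_smallest_segment_set (n : Int) (k : Int) (segments : List (Int × Int)) : Int × (List (Int × Int)) :=
  let endpoints := segments.foldl (fun acc p => acc ++ [2 * p.1, 2 * p.2 + 1]) []
  let endpoints := PySem.List.sorted endpoints (fun x => x) false
  let st := endpoints.foldl (pvStepA k) (0, none, [])
  ((st.2.2.length : Int), st.2.2)

-- ===== PORT B =====
-- port of Source B's conditional 'rights.pop(0)': drop a downward crossing preceding every upward one
def pvDrop (L R : List Int) : List Int :=
  match R, L with
  | [], _ => []
  | _ :: rs, [] => rs
  | r :: rs, l :: _ => if r < l then rs else r :: rs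

-- one coordinate of Source B's loop: stateless counts, threshold-crossing tests
def pvCrossSeg (k : Int) (segments : List (Int × Int)) (p : List Int × List Int) (x : Int) :
    List Int × List Int :=
  let below_l := segments.foldl (fun acc q => if q.1 < x then acc + 1 else acc) (0 : Int)
  let below_r := segments.foldl (fun acc q => if q.2 < x then acc + 1 else acc) (0 : Int)
  let upto_l := segments.foldl (fun acc q => if q.1 ≤ x then acc + 1 else acc) (0 : Int)
  let upto_r := segments.foldl (fun acc q => if q.2 ≤ x then acc + 1 else acc) (0 : Int)
  let before := below_l - below_r
  let cat := upto_l - below_r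
  let caf := upto_l - upto_r
  ((if before < k ∧ k ≤ cat then p.1 ++ [x] else p.1),
   (if caf < k ∧ k ≤ cat then p.2 ++ [x] else p.2))

def find_smallest_segment_set_alt (n : Int) (k : Int) (segments : List (Int × Int)) : Int × (List (Int × Int)) :=
  let coords := PySem.List.sorted
    (PySem.Set.ofList (segments.foldl (fun acc p => acc ++ [p.1, p.2]) [])) (fun x => x) false
  let lr := coords.foldl (pvCrossSeg k segments) ([], [])
  let lefts := lr.1
  let rights := pvDrop lefts lr.2
  let tot := lefts.zip rights
  ((tot.length : Int), tot)

-- ===== PRECONDITION & SPEC =====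
def Spec_find_smallest_segment_set (n : Int) (k : Int) (segments : List (Int × Int)) (out : Int × (List (Int × Int))) : Prop := out = find_smallest_segment_set_alt n k segments
instance (n : Int) (k : Int) (segments : List (Int × Int)) (out : Int × (List (Int × Int))) : Decidable (Spec_find_smallest_segment_set n k segments out) := by unfold Spec_find_smallest_segment_set; infer_instance

-- ===== CLAIM (what is proved, stated in full; the proofs are below) =====
def Claim_equal_find_smallest_segment_set : Prop := ∀ (n : Int) (k : Int) (segments : List (Int × Int)), Dom_find_smallest_segment_set n k segments → Spec_find_smallest_segment_set n k segments (find_smallest_segment_set n k segments)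

-- ===== LEMMAS AND PROOFS =====

-- the block of encoded events contributed by coordinate v
def pvBlock (F E : List Int) (v : Int) : List Int :=
  List.replicate (F.count v) (2 * v) ++ List.replicate (E.count v) (2 * v + 1)

-- A's per-coordinate state machine, with per-coordinate multiplicities as counts
def pvStepC (k : Int) (F E : List Int) (st : Int × Option Int × List (Int × Int)) (v : Int) :
    Int × Option Int × List (Int × Int) :=
  let c := st.1; let res := st.2.1; let tot := st.2.2
  let s : Int := (F.count v : Int)
  let res := if res = none ∧ c < k ∧ k ≤ c + s then some v else res
  let c := c + s
  let e : Int := (E.count v : Int)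
  if res ≠ none ∧ c - e ≤ k - 1 ∧ k - 1 < c then (c - e, none, tot ++ [(res.get!, v)])
  else (c - e, res, tot)

-- B's per-coordinate crossing step, phrased over the endpoint lists F and E
def pvCrossFE (k : Int) (F E : List Int) (p : List Int × List Int) (x : Int) :
    List Int × List Int :=
  let cb : Int := (F.countP (fun v => decide (v < x)) : Int) - (E.countP (fun v => decide (v < x)) : Int)
  let ca : Int := (F.countP (fun v => decide (v ≤ x)) : Int) - (E.countP (fun v => decide (v < x)) : Int)
  let cf : Int := (F.countP (fun v => decide (v ≤ x)) : Int) - (E.countP (fun v => decide (v ≤ x)) : Int)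
  ((if cb < k ∧ k ≤ ca then p.1 ++ [x] else p.1),
   (if cf < k ∧ k ≤ ca then p.2 ++ [x] else p.2))

def pvBelowAll (rest : List Int) (v : Int) : Bool := rest.all (fun x => decide (v < x))

-- loop invariant relating A's sweep state to B's crossing lists
def pvInv (k c : Int) (res : Option Int) (tot : List (Int × Int)) (L R : List Int) : Prop :=
  match res with
  | none => (k ≤ c → L = [] ∧ R = [] ∧ tot = []) ∧
            (c < k → L.length = (pvDrop L R).length ∧ tot = L.zip (pvDrop L R))
  | some v => k ≤ c ∧ ∃ L₁, L = L₁ ++ [v] ∧ L₁.length = (pvDrop L R).length ∧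
              tot = L₁.zip (pvDrop L R)

theorem pvMod_even (v : Int) : PySem.Int.mod (2 * v) 2 = 0 := by
  rw [PySem.Int.mod_eq_emod_of_pos (by norm_num)]; omega

theorem pvDiv_even (v : Int) : PySem.Int.floordiv (2 * v) 2 = v := by
  rw [PySem.Int.floordiv_eq_ediv_of_pos (by norm_num)]; omega

theorem pvMod_odd (v : Int) : PySem.Int.mod (2 * v + 1) 2 = 1 := by
  rw [PySem.Int.mod_eq_emod_of_pos (by norm_num)]; omega

theorem pvDiv_odd (v : Int) : PySem.Int.floordiv (2 * v + 1) 2 = v := by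
  rw [PySem.Int.floordiv_eq_ediv_of_pos (by norm_num)]; omega

theorem pvStartsRun (k v : Int) : ∀ (s : Nat) (c : Int) (res : Option Int) (tot : List (Int × Int)),
    (List.replicate s (2 * v)).foldl (pvStepA k) (c, res, tot)
      = (c + s, if res = none ∧ c < k ∧ k ≤ c + (s : Int) then some v else res, tot) := by
  intro s
  induction s with
  | zero =>
    intro c res tot
    simp only [List.replicate, List.foldl_nil, Nat.cast_zero, add_zero]
    split_ifs with h
    · omega
    · rfl
  | succ s ih =>
    intro c res tot
    rw [List.replicate_succ, List.foldl_cons]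
    have hstep : pvStepA k (c, res, tot) (2 * v)
        = (c + 1, if c + 1 = k ∧ res = none then some v else res, tot) := by
      simp only [pvStepA, pvMod_even, pvDiv_even]
      split_ifs <;> rfl
    rw [hstep, ih]
    push_cast
    cases res <;> split_ifs <;> simp_all [Prod.ext_iff] <;> omega

theorem pvEndsRun (k v : Int) : ∀ (e : Nat) (c : Int) (res : Option Int) (tot : List (Int × Int)),
    (List.replicate e (2 * v + 1)).foldl (pvStepA k) (c, res, tot)
      = if res ≠ none ∧ c - (e : Int) ≤ k - 1 ∧ k - 1 < c
        then (c - e, none, tot ++ [(res.get!, v)]) else (c - e, res, tot) := by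
  intro e
  induction e with
  | zero =>
    intro c res tot
    simp only [List.replicate, List.foldl_nil, Nat.cast_zero, sub_zero]
    split_ifs with h
    · omega
    · rfl
  | succ e ih =>
    intro c res tot
    rw [List.replicate_succ, List.foldl_cons]
    have hstep : pvStepA k (c, res, tot) (2 * v + 1)
        = if c - 1 = k - 1 ∧ res ≠ none then (c - 1, none, tot ++ [(res.get!, v)])
          else (c - 1, res, tot) := by
      simp only [pvStepA, pvMod_odd, pvDiv_odd]
      rw [if_neg one_ne_zero]
    rw [hstep]
    by_cases hk : c - 1 = k - 1 ∧ res ≠ none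
    · rw [if_pos hk, ih]
      cases res with
      | none => exact absurd rfl hk.2
      | some r =>
        rw [if_neg (by simp)]
        rw [if_pos ⟨by simp, by omega, by omega⟩]
        simp only [Prod.mk.injEq]
        and_intros <;> first | trivial | omega
    · rw [if_neg hk, ih]
      cases res with
      | none =>
        rw [if_neg (by simp), if_neg (by simp)]
        simp only [Prod.mk.injEq]
        and_intros <;> first | trivial | omega
      | some r =>
        have hc : ¬ (c - 1 = k - 1) := fun h => hk ⟨h, by simp⟩
        have hiff : ((some r : Option Int) ≠ none ∧ c - 1 - (e : Int) ≤ k - 1 ∧ k - 1 < c - 1)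
             ↔ ((some r : Option Int) ≠ none ∧ c - ((e : Nat) + 1 : Int) ≤ k - 1 ∧ k - 1 < c) := by
          constructor <;> rintro ⟨-, h1, h2⟩ <;> exact ⟨by simp, by omega, by omega⟩
        rw [if_congr hiff rfl rfl]
        split_ifs <;> (simp only [Prod.mk.injEq]; and_intros <;> first | trivial | omega)

theorem pvSweep (k : Int) (F E : List Int) :
    ∀ (coords : List Int) (st : Int × Option Int × List (Int × Int)),
    (coords.flatMap (pvBlock F E)).foldl (pvStepA k) st
      = coords.foldl (pvStepC k F E) st := by
  intro coords
  induction coords with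
  | nil => intro st; rfl
  | cons v t ih =>
    intro st
    obtain ⟨c, res, tot⟩ := st
    rw [List.flatMap_cons, List.foldl_append, List.foldl_cons]
    rw [show pvBlock F E v = List.replicate (F.count v) (2 * v) ++ List.replicate (E.count v) (2 * v + 1) from rfl]
    rw [List.foldl_append, pvStartsRun, pvEndsRun, ih]
    rfl

theorem pvCountFlat (xs : List Int) : ∀ (L : List Int), L.Nodup → ∀ (y : Int),
    (L.flatMap (fun v => List.replicate (xs.count v) v)).count y
      = if y ∈ L then xs.count y else 0 := by
  intro L
  induction L with
  | nil => intro _ y; simp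
  | cons v t ih =>
    intro hnd y
    rw [List.flatMap_cons, List.count_append, ih hnd.of_cons, List.count_replicate]
    have hvt : v ∉ t := (List.nodup_cons.1 hnd).1
    by_cases hy : y = v
    · subst hy
      simp [hvt]
    · simp [hy, List.mem_cons]
      intro h; exact absurd h.symm hy

theorem pvPermReplicate (xs L : List Int) (hnd : L.Nodup) (hsub : ∀ x ∈ xs, x ∈ L) :
    xs.Perm (L.flatMap (fun v => List.replicate (xs.count v) v)) := by
  rw [List.perm_iff_count]
  intro y
  rw [pvCountFlat xs L hnd y]
  by_cases hy : y ∈ L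
  · simp [hy]
  · rw [if_neg hy, List.count_eq_zero]
    exact fun hmem => hy (hsub y hmem)

theorem pvFlatAppendPerm (L : List Int) (a b : Int → List Int) :
    (L.flatMap (fun v => a v ++ b v)).Perm (L.flatMap a ++ L.flatMap b) := by
  induction L with
  | nil => simp
  | cons v t ih =>
    simp only [List.flatMap_cons]
    refine (ih.append_left (a v ++ b v)).trans ?_
    simp only [List.append_assoc]
    exact (List.perm_append_comm_assoc (b v) (t.flatMap a) (t.flatMap b)).append_left (a v)

theorem pvTwoMulInj : Function.Injective (fun x : Int => 2 * x) := by
  intro a b h; simp only at h; omega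

theorem pvTwoMulAddInj : Function.Injective (fun x : Int => 2 * x + 1) := by
  intro a b h; simp only at h; omega

theorem pvPermBlocks (F E : List Int) (coords : List Int) (hnd : coords.Nodup)
    (hF : ∀ x ∈ F, x ∈ coords) (hE : ∀ x ∈ E, x ∈ coords) :
    (F.map (fun x => 2 * x) ++ E.map (fun x => 2 * x + 1)).Perm (coords.flatMap (pvBlock F E)) := by
  have hFperm : (F.map (fun x => 2 * x)).Perm
      (coords.flatMap (fun v => List.replicate (F.count v) (2 * v))) := by
    have h := pvPermReplicate (F.map (fun x => 2 * x)) (coords.map (fun x => 2 * x))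
      (hnd.map pvTwoMulInj)
      (by intro x hx
          obtain ⟨a, ha, rfl⟩ := List.mem_map.1 hx
          exact List.mem_map_of_mem (hF a ha))
    rw [List.flatMap_map] at h
    refine h.trans (List.Perm.of_eq ?_)
    refine List.flatMap_congr ?_
    intro v _
    rw [List.count_map_of_injective _ _ pvTwoMulInj]
  have hEperm : (E.map (fun x => 2 * x + 1)).Perm
      (coords.flatMap (fun v => List.replicate (E.count v) (2 * v + 1))) := by
    have h := pvPermReplicate (E.map (fun x => 2 * x + 1)) (coords.map (fun x => 2 * x + 1))
      (hnd.map pvTwoMulAddInj)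
      (by intro x hx
          obtain ⟨a, ha, rfl⟩ := List.mem_map.1 hx
          exact List.mem_map_of_mem (hE a ha))
    rw [List.flatMap_map] at h
    refine h.trans (List.Perm.of_eq ?_)
    refine List.flatMap_congr ?_
    intro v _
    rw [List.count_map_of_injective _ _ pvTwoMulAddInj]
  exact (hFperm.append hEperm).trans (pvFlatAppendPerm coords _ _).symm

theorem pvPairwiseBlocks (F E : List Int) (coords : List Int) (hlt : coords.Pairwise (· < ·)) :
    (coords.flatMap (pvBlock F E)).Pairwise (· ≤ ·) := by
  induction coords with
  | nil => simp
  | cons v t ih =>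
    rw [List.pairwise_cons] at hlt
    rw [List.flatMap_cons, List.pairwise_append]
    refine ⟨?_, ih hlt.2, ?_⟩
    · rw [pvBlock, List.pairwise_append]
      refine ⟨List.pairwise_replicate.2 (Or.inr le_rfl), List.pairwise_replicate.2 (Or.inr le_rfl), ?_⟩
      intro x hx y hy
      rw [List.eq_of_mem_replicate hx, List.eq_of_mem_replicate hy]
      omega
    · intro x hx y hy
      have hx' : x = 2 * v ∨ x = 2 * v + 1 := by
        rcases List.mem_append.1 hx with h | h
        · exact Or.inl (List.eq_of_mem_replicate h)
        · exact Or.inr (List.eq_of_mem_replicate h)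
      obtain ⟨w, hw, hy'⟩ := List.mem_flatMap.1 hy
      have hvw : v < w := hlt.1 w hw
      have hy'' : y = 2 * w ∨ y = 2 * w + 1 := by
        rcases List.mem_append.1 hy' with h | h
        · exact Or.inl (List.eq_of_mem_replicate h)
        · exact Or.inr (List.eq_of_mem_replicate h)
      omega

theorem pvEndpointsPerm (segments : List (Int × Int)) :
    (segments.flatMap (fun p => [2 * p.1, 2 * p.2 + 1])).Perm
      ((segments.map Prod.fst).map (fun x => 2 * x) ++ (segments.map Prod.snd).map (fun x => 2 * x + 1)) := by
  induction segments with
  | nil => simp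
  | cons p t ih =>
    simp only [List.flatMap_cons, List.map_cons, List.cons_append]
    refine List.Perm.cons _ ?_
    exact ((ih.cons _).trans List.perm_middle.symm)

-- countP(≤ x) = countP(< x) + count x
theorem pvCountP_le (F : List Int) (x : Int) :
    F.countP (fun v => decide (v ≤ x)) = F.countP (fun v => decide (v < x)) + F.count x := by
  induction F with
  | nil => simp
  | cons a t ih =>
    simp only [List.countP_cons, List.count_cons, ih, beq_iff_eq]
    by_cases h1 : a ≤ x <;> by_cases h2 : a < x <;> by_cases h3 : a = x <;>
      simp [h1, h2, h3] <;> omega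

-- zip with the longer left list truncates
theorem pvZipAppL {α β : Type} (a : α) : ∀ (L : List α) (R : List β),
    R.length ≤ L.length → (L ++ [a]).zip R = L.zip R := by
  intro L
  induction L with
  | nil =>
    intro R hR
    have : R = [] := List.eq_nil_of_length_eq_zero (Nat.le_zero.1 hR)
    subst this; simp
  | cons l L ih =>
    intro R hR
    cases R with
    | nil => simp
    | cons r R => simp only [List.cons_append, List.zip_cons_cons, ih R (by simpa using hR)]

theorem pvDrop_append (x l : Int) (Lt : List Int) (hl : l < x) :
    ∀ (R : List Int), pvDrop (l :: Lt) (R ++ [x]) = pvDrop (l :: Lt) R ++ [x] := by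
  intro R
  cases R with
  | nil =>
    simp only [List.nil_append, pvDrop, if_neg (by omega : ¬ x < l)]
  | cons r rs =>
    simp only [List.cons_append, pvDrop]
    split_ifs <;> simp

theorem pvDrop_nil_right (L : List Int) : pvDrop L [] = [] := by cases L <;> rfl

theorem pvDrop_head (l : Int) (Lt Lt' R : List Int) :
    pvDrop (l :: Lt) R = pvDrop (l :: Lt') R := by cases R <;> rfl

theorem pvDrop_concat_left (L R : List Int) (x : Int)
    (hlen : L.length = (pvDrop L R).length) (hR : ∀ y ∈ R, y < x) :
    pvDrop (L ++ [x]) R = pvDrop L R := by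
  cases L with
  | cons l Lt => exact pvDrop_head l (Lt ++ [x]) Lt R
  | nil =>
    cases R with
    | nil => rfl
    | cons r rs =>
      have hrs : rs = [] := List.eq_nil_of_length_eq_zero (by simpa using hlen.symm)
      subst hrs
      have hrx : r < x := hR r (by simp)
      simp only [List.nil_append, pvDrop, if_pos hrx]

theorem pvDrop_append' (L R : List Int) (x : Int) (hne : L ≠ [])
    (hall : ∀ y ∈ L, y < x) : pvDrop L (R ++ [x]) = pvDrop L R ++ [x] := by
  cases L with
  | nil => exact absurd rfl hne
  | cons l Lt => exact pvDrop_append x l Lt (hall l (by simp)) R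

-- one coordinate preserves the invariant
theorem pvStepInv (k cb s e x : Int) (hs : 0 ≤ s) (he : 0 ≤ e)
    (res : Option Int) (tot : List (Int × Int)) (L R : List Int)
    (hL : ∀ y ∈ L, y < x) (hR : ∀ y ∈ R, y < x)
    (hInv : pvInv k cb res tot L R) :
    pvInv k (cb + s - e)
      (if (if res = none ∧ cb < k ∧ k ≤ cb + s then some x else res) ≠ none ∧ cb + s - e ≤ k - 1 ∧ k - 1 < cb + s
        then ((none : Option Int))
        else (if res = none ∧ cb < k ∧ k ≤ cb + s then some x else res))
      (if (if res = none ∧ cb < k ∧ k ≤ cb + s then some x else res) ≠ none ∧ cb + s - e ≤ k - 1 ∧ k - 1 < cb + s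
        then tot ++ [((if res = none ∧ cb < k ∧ k ≤ cb + s then some x else res).get!, x)]
        else tot)
      (if cb < k ∧ k ≤ cb + s then L ++ [x] else L)
      (if cb + s - e < k ∧ k ≤ cb + s then R ++ [x] else R) ∧
    (∀ y, (y ∈ (if cb < k ∧ k ≤ cb + s then L ++ [x] else L) ∨
           y ∈ (if cb + s - e < k ∧ k ≤ cb + s then R ++ [x] else R)) → y ≤ x) := by
  cases res with
  | none =>
    simp only [pvInv] at hInv
    obtain ⟨hge, hlt⟩ := hInv
    by_cases hU : cb < k ∧ k ≤ cb + s
    · obtain ⟨hlen, hzip⟩ := hlt hU.1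
      simp only [true_and, if_pos hU]
      by_cases hD : cb + s - e ≤ k - 1
      · simp only [if_pos (show (some x ≠ none) ∧ cb + s - e ≤ k - 1 ∧ k - 1 < cb + s from
            ⟨by simp, hD, by omega⟩),
          if_pos (show cb + s - e < k ∧ k ≤ cb + s from ⟨by omega, hU.2⟩), Option.get!_some]
        refine ⟨⟨fun hkc => absurd hkc (by omega), fun _ => ?_⟩, ?_⟩
        · cases R with
          | nil =>
            have hLnil : L = [] := List.eq_nil_of_length_eq_zero (by simpa [pvDrop_nil_right] using hlen)
            subst hLnil
            simp only [List.nil_append, hzip, pvDrop,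
              if_neg (by omega : ¬ x < x), List.zip_nil_right]
            exact ⟨trivial, by simp⟩
          | cons r rs =>
            have hrx : r < x := hR r (by simp)
            cases L with
            | nil =>
              have hrs : rs = [] := List.eq_nil_of_length_eq_zero (by simpa [pvDrop] using hlen.symm)
              subst hrs
              simp only [List.nil_append, List.cons_append, hzip]
              simp only [pvDrop, if_pos hrx, List.zip_nil_right]
              exact ⟨trivial, by simp⟩
            | cons l Lt =>
              have hdr : pvDrop ((l :: Lt) ++ [x]) ((r :: rs) ++ [x])
                  = pvDrop (l :: Lt) (r :: rs) ++ [x] := by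
                have hlx : l < x := hL l (by simp)
                rw [show (l :: Lt) ++ [x] = l :: (Lt ++ [x]) from rfl,
                  pvDrop_head l (Lt ++ [x]) Lt ((r :: rs) ++ [x]),
                  pvDrop_append x l Lt hlx (r :: rs)]
              rw [hdr]
              refine ⟨by have hx9 := hlen; simp only [List.length_cons] at hx9; simp only [List.length_append, List.length_cons, List.length_nil]; omega, ?_⟩
              rw [List.zip_append hlen, hzip]
              simp
        · intro y hy
          rcases hy with h | h <;> rw [List.mem_append] at h <;> rcases h with h | h
          · exact le_of_lt (hL y h)
          · simp at h; omega
          · exact le_of_lt (hR y h)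
          · simp at h; omega
      · simp only [if_neg (show ¬ ((some x ≠ none) ∧ cb + s - e ≤ k - 1 ∧ k - 1 < cb + s) from
            fun h => hD h.2.1),
          if_neg (show ¬ (cb + s - e < k ∧ k ≤ cb + s) from fun h => absurd h.1 (by omega))]
        have hdc : pvDrop (L ++ [x]) R = pvDrop L R := pvDrop_concat_left L R x hlen hR
        refine ⟨⟨by omega, L, rfl, ?_, ?_⟩, ?_⟩
        · rw [hdc]; exact hlen
        · rw [hdc]; exact hzip
        · intro y hy
          rcases hy with h | h
          · rw [List.mem_append] at h
            rcases h with h | h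
            · exact le_of_lt (hL y h)
            · simp at h; omega
          · exact le_of_lt (hR y h)
    · simp only [true_and, if_neg hU]
      simp only [if_neg (show ¬ (((none : Option Int)) ≠ none ∧
          cb + s - e ≤ k - 1 ∧ k - 1 < cb + s) from fun h => h.1 rfl)]
      by_cases hk : k ≤ cb
      · obtain ⟨hL0, hR0, ht0⟩ := hge hk
        subst hL0; subst hR0; subst ht0
        by_cases hd2 : cb + s - e < k ∧ k ≤ cb + s
        · simp only [if_pos hd2]
          refine ⟨⟨fun hkc => absurd hkc (by omega), fun _ => ?_⟩, ?_⟩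
          · simp [pvDrop]
          · intro y hy
            rcases hy with h | h
            · simp at h
            · simp at h; omega
        · simp only [if_neg hd2]
          refine ⟨⟨fun _ => ⟨rfl, rfl, rfl⟩, fun hc => ?_⟩,
            by intro y hy; rcases hy with h | h <;> simp at h⟩
          exact absurd ⟨hc, by omega⟩ hd2
      · have hca : cb + s < k := by
          rcases not_and_or.1 hU with h | h
          · omega
          · omega
        obtain ⟨hlen, hzip⟩ := hlt (by omega)
        simp only [if_neg (show ¬ (cb + s - e < k ∧ k ≤ cb + s) from fun h => absurd h.2 (by omega))]
        refine ⟨⟨fun hkc => absurd hkc (by omega), fun _ => ⟨hlen, hzip⟩⟩, ?_⟩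
        intro y hy
        rcases hy with h | h
        · exact le_of_lt (hL y h)
        · exact le_of_lt (hR y h)
  | some v =>
    simp only [pvInv] at hInv
    obtain ⟨hk, L₁, hLdec, hlen, hzip⟩ := hInv
    simp only [reduceCtorEq, false_and, if_false,
      if_neg (show ¬ (cb < k ∧ k ≤ cb + s) from fun h => absurd h.1 (by omega))]
    by_cases hD : cb + s - e ≤ k - 1
    · simp only [if_pos (show (some v ≠ none) ∧ cb + s - e ≤ k - 1 ∧ k - 1 < cb + s from
          ⟨by simp, hD, by omega⟩),
        if_pos (show cb + s - e < k ∧ k ≤ cb + s from ⟨by omega, by omega⟩), Option.get!_some]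
      refine ⟨⟨fun hkc => absurd hkc (by omega), fun _ => ?_⟩, ?_⟩
      · subst hLdec
        rw [pvDrop_append' (L₁ ++ [v]) R x (by simp) hL]
        refine ⟨by simp only [List.length_append, List.length_cons, List.length_nil]; omega, ?_⟩
        rw [List.zip_append hlen, hzip]
        simp
      · intro y hy
        rcases hy with h | h
        · exact le_of_lt (hL y h)
        · rw [List.mem_append] at h
          rcases h with h | h
          · exact le_of_lt (hR y h)
          · simp at h; omega
    · simp only [if_neg (show ¬ ((some v ≠ none) ∧ cb + s - e ≤ k - 1 ∧ k - 1 < cb + s) from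
          fun h => hD h.2.1),
        if_neg (show ¬ (cb + s - e < k ∧ k ≤ cb + s) from fun h => absurd h.1 (by omega))]
      refine ⟨⟨by omega, L₁, hLdec, hlen, hzip⟩, ?_⟩
      intro y hy
      rcases hy with h | h
      · exact le_of_lt (hL y h)
      · exact le_of_lt (hR y h)

-- main induction: A's per-coordinate sweep equals B's crossing lists zipped
theorem pvMain (k : Int) (F E : List Int) :
    ∀ (rest : List Int), rest.Pairwise (· < ·) →
    (∀ v, (v ∈ F ∨ v ∈ E) → v ∈ rest ∨ ∀ x ∈ rest, v < x) →
    ∀ (res : Option Int) (tot : List (Int × Int)) (L R : List Int),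
    (∀ y, (y ∈ L ∨ y ∈ R) → ∀ x ∈ rest, y < x) →
    pvInv k ((F.countP (pvBelowAll rest) : Int) - (E.countP (pvBelowAll rest) : Int)) res tot L R →
    (rest.foldl (pvStepC k F E)
        (((F.countP (pvBelowAll rest) : Int) - (E.countP (pvBelowAll rest) : Int)), res, tot)).2.2
      = (rest.foldl (pvCrossFE k F E) (L, R)).1.zip
          (pvDrop (rest.foldl (pvCrossFE k F E) (L, R)).1 (rest.foldl (pvCrossFE k F E) (L, R)).2) := by
  intro rest
  induction rest with
  | nil =>
    intro _ _ res tot L R hLR hInv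
    simp only [List.foldl_nil]
    simp only [pvInv] at hInv
    cases res with
    | none =>
      by_cases hk : k ≤ (F.countP (pvBelowAll []) : Int) - (E.countP (pvBelowAll []) : Int)
      · obtain ⟨hL0, hR0, ht0⟩ := hInv.1 hk
        subst hL0; subst hR0
        simpa using ht0
      · exact (hInv.2 (by omega)).2
    | some v =>
      obtain ⟨hk, L₁, hdec, hlen, hzip⟩ := hInv
      subst hdec
      rw [pvZipAppL v L₁ (pvDrop (L₁ ++ [v]) R) (le_of_eq hlen.symm)]
      exact hzip
  | cons x rest ih =>
    intro hpw h2 res tot L R hLR hInv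
    have hxr : ∀ y ∈ rest, x < y := (List.pairwise_cons.1 hpw).1
    have hco1 : ∀ (G : List Int),
        G.countP (pvBelowAll (x :: rest)) = G.countP (fun v => decide (v < x)) := by
      intro G
      refine List.countP_congr ?_
      intro a _
      simp only [pvBelowAll, List.all_cons, Bool.and_eq_true, decide_eq_true_eq, List.all_eq_true]
      constructor
      · rintro ⟨h1, _⟩; exact h1
      · intro h1; exact ⟨h1, fun y hy => lt_trans h1 (hxr y hy)⟩
    have hco2 : ∀ (G : List Int), (∀ v ∈ G, v ∈ (x :: rest) ∨ ∀ z ∈ (x :: rest), v < z) →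
        G.countP (pvBelowAll rest) = G.countP (fun v => decide (v ≤ x)) := by
      intro G hG
      refine List.countP_congr ?_
      intro a ha
      simp only [pvBelowAll, List.all_eq_true, decide_eq_true_eq]
      constructor
      · intro hall
        rcases hG a ha with hm | hb
        · rcases List.mem_cons.1 hm with rfl | hm'
          · omega
          · exact absurd (hall a hm') (lt_irrefl a)
        · exact le_of_lt (hb x (by simp))
      · intro hax y hy
        exact lt_of_le_of_lt hax (hxr y hy)
    set cb := (F.countP (fun v => decide (v < x)) : Int) - (E.countP (fun v => decide (v < x)) : Int) with hcbdef
    set s := (F.count x : Int) with hsdef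
    set e := (E.count x : Int) with hedef
    have hcb : (F.countP (pvBelowAll (x :: rest)) : Int) - (E.countP (pvBelowAll (x :: rest)) : Int) = cb := by
      rw [hco1 F, hco1 E]
    have hcf : (F.countP (pvBelowAll rest) : Int) - (E.countP (pvBelowAll rest) : Int) = cb + s - e := by
      have h2F : ∀ v ∈ F, v ∈ (x :: rest) ∨ ∀ z ∈ (x :: rest), v < z := fun v hv => h2 v (Or.inl hv)
      have h2E : ∀ v ∈ E, v ∈ (x :: rest) ∨ ∀ z ∈ (x :: rest), v < z := fun v hv => h2 v (Or.inr hv)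
      rw [hco2 F h2F, hco2 E h2E, pvCountP_le F x, pvCountP_le E x]
      push_cast
      omega
    have hL' : ∀ y ∈ L, y < x := fun y hy => hLR y (Or.inl hy) x (by simp)
    have hR' : ∀ y ∈ R, y < x := fun y hy => hLR y (Or.inr hy) x (by simp)
    rw [hcb] at hInv
    obtain ⟨hInv', hle⟩ := pvStepInv k cb s e x (by simp [hsdef]) (by simp [hedef])
      res tot L R hL' hR' hInv
    simp only [List.foldl_cons]
    have hstep : pvStepC k F E
        ((F.countP (pvBelowAll (x :: rest)) : Int) - (E.countP (pvBelowAll (x :: rest)) : Int), res, tot) x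
        = (cb + s - e,
           (if (if res = none ∧ cb < k ∧ k ≤ cb + s then some x else res) ≠ none ∧ cb + s - e ≤ k - 1 ∧ k - 1 < cb + s
             then (none : Option Int)
             else (if res = none ∧ cb < k ∧ k ≤ cb + s then some x else res)),
           (if (if res = none ∧ cb < k ∧ k ≤ cb + s then some x else res) ≠ none ∧ cb + s - e ≤ k - 1 ∧ k - 1 < cb + s
             then tot ++ [((if res = none ∧ cb < k ∧ k ≤ cb + s then some x else res).get!, x)]
             else tot)) := by
      rw [hcb]
      simp only [pvStepC]
      rw [← hsdef, ← hedef]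
      split_ifs <;> rfl
    have hcross : pvCrossFE k F E (L, R) x
        = ((if cb < k ∧ k ≤ cb + s then L ++ [x] else L),
           (if cb + s - e < k ∧ k ≤ cb + s then R ++ [x] else R)) := by
      simp only [pvCrossFE]
      rw [pvCountP_le F x, pvCountP_le E x]
      push_cast
      refine congrArg₂ Prod.mk ?_ ?_ <;> exact if_congr (by omega) rfl rfl
    rw [hstep, hcross]
    have h2new : ∀ v, (v ∈ F ∨ v ∈ E) → v ∈ rest ∨ ∀ z ∈ rest, v < z := by
      intro v hv
      rcases h2 v hv with hm | hb
      · rcases List.mem_cons.1 hm with rfl | hm'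
        · exact Or.inr (fun z hz => hxr z hz)
        · exact Or.inl hm'
      · exact Or.inr (fun z hz => hb z (by simp [hz]))
    have hLR' : ∀ y, (y ∈ (if cb < k ∧ k ≤ cb + s then L ++ [x] else L) ∨
        y ∈ (if cb + s - e < k ∧ k ≤ cb + s then R ++ [x] else R)) → ∀ z ∈ rest, y < z :=
      fun y hy z hz => lt_of_le_of_lt (hle y hy) (hxr z hz)
    revert hInv' hLR'
    generalize (if (if res = none ∧ cb < k ∧ k ≤ cb + s then some x else res) ≠ none ∧ cb + s - e ≤ k - 1 ∧ k - 1 < cb + s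
        then (none : Option Int)
        else (if res = none ∧ cb < k ∧ k ≤ cb + s then some x else res)) = res₁
    generalize (if (if res = none ∧ cb < k ∧ k ≤ cb + s then some x else res) ≠ none ∧ cb + s - e ≤ k - 1 ∧ k - 1 < cb + s
        then tot ++ [((if res = none ∧ cb < k ∧ k ≤ cb + s then some x else res).get!, x)]
        else tot) = tot₁
    generalize (if cb < k ∧ k ≤ cb + s then L ++ [x] else L) = L₁
    generalize (if cb + s - e < k ∧ k ≤ cb + s then R ++ [x] else R) = R₁
    rw [← hcf]
    intro h1 h2
    exact ih (List.pairwise_cons.1 hpw).2 h2new _ _ _ _ (by assumption) (by assumption)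

theorem pvCrossSegEq (k : Int) (segs : List (Int × Int)) :
    pvCrossSeg k segs = pvCrossFE k (segs.map Prod.fst) (segs.map Prod.snd) := by
  funext p x
  simp [pvCrossSeg, pvCrossFE, PySem.List.foldl_ite_add_one, List.countP_map, Function.comp_def]

-- ===== VERDICT (by name: the statement is the Claim_ definition above) =====
theorem find_smallest_segment_set_spec : Claim_equal_find_smallest_segment_set := by
  intro n k segs _
  unfold Spec_find_smallest_segment_set
  simp only [find_smallest_segment_set, find_smallest_segment_set_alt]
  rw [PySem.List.foldl_append_eq_flatMap, PySem.List.foldl_append_eq_flatMap, List.nil_append,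
    List.nil_append]
  have hmemC : ∀ y, y ∈ PySem.List.sorted
      (PySem.Set.ofList (segs.flatMap (fun p => [p.1, p.2]))) (fun x => x) false
      ↔ (y ∈ segs.map Prod.fst ∨ y ∈ segs.map Prod.snd) := by
    intro y
    rw [PySem.List.mem_sorted, PySem.Set.mem_ofList, List.mem_flatMap]
    constructor
    · rintro ⟨p, hp, hy⟩
      rcases List.mem_cons.1 hy with rfl | hy'
      · exact Or.inl (List.mem_map_of_mem hp)
      · rcases List.mem_cons.1 hy' with rfl | h
        · exact Or.inr (List.mem_map_of_mem hp)
        · simp at h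
    · rintro (h | h) <;> obtain ⟨p, hp, rfl⟩ := List.mem_map.1 h
      · exact ⟨p, hp, by simp⟩
      · exact ⟨p, hp, by simp⟩
  have hnd : (PySem.List.sorted
      (PySem.Set.ofList (segs.flatMap (fun p => [p.1, p.2]))) (fun x => x) false).Nodup :=
    (PySem.List.sorted_perm _ _ _).symm.nodup (PySem.Set.nodup_ofList _)
  have hlt := PySem.List.sorted_ofList_pairwise_lt (segs.flatMap (fun p => [p.1, p.2]))
  have hFC : ∀ z ∈ segs.map Prod.fst, z ∈ PySem.List.sorted
      (PySem.Set.ofList (segs.flatMap (fun p => [p.1, p.2]))) (fun x => x) false :=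
    fun z hz => (hmemC z).2 (Or.inl hz)
  have hEC : ∀ z ∈ segs.map Prod.snd, z ∈ PySem.List.sorted
      (PySem.Set.ofList (segs.flatMap (fun p => [p.1, p.2]))) (fun x => x) false :=
    fun z hz => (hmemC z).2 (Or.inr hz)
  have hsorted : PySem.List.sorted (segs.flatMap (fun p => [2 * p.1, 2 * p.2 + 1])) (fun x => x) false
      = (PySem.List.sorted (PySem.Set.ofList (segs.flatMap (fun p => [p.1, p.2]))) (fun x => x)
          false).flatMap (pvBlock (segs.map Prod.fst) (segs.map Prod.snd)) := by
    apply PySem.List.eq_of_perm_of_pairwise_le_of_injective (fun x => x) (fun a b h => h)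
    · exact (PySem.List.sorted_perm _ _ _).trans
        ((pvEndpointsPerm segs).trans (pvPermBlocks _ _ _ hnd hFC hEC))
    · exact PySem.List.sorted_pairwise _ _
    · exact pvPairwiseBlocks _ _ _ hlt
  rw [hsorted, pvSweep]
  have h0 : ∀ (G : List Int), (∀ v ∈ G, v ∈ PySem.List.sorted
      (PySem.Set.ofList (segs.flatMap (fun p => [p.1, p.2]))) (fun x => x) false) →
      G.countP (pvBelowAll (PySem.List.sorted
        (PySem.Set.ofList (segs.flatMap (fun p => [p.1, p.2]))) (fun x => x) false)) = 0 := by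
    intro G hG
    rw [List.countP_eq_zero]
    intro a ha hall
    simp only [pvBelowAll, List.all_eq_true, decide_eq_true_eq] at hall
    exact lt_irrefl a (hall a (hG a ha))
  have hmain := pvMain k (segs.map Prod.fst) (segs.map Prod.snd)
    (PySem.List.sorted (PySem.Set.ofList (segs.flatMap (fun p => [p.1, p.2]))) (fun x => x) false)
    hlt (fun v hv => Or.inl ((hmemC v).2 hv)) none [] [] []
    (by intro y hy z hz; rcases hy with h | h <;> simp at h)
    (by
      refine ⟨fun _ => ⟨rfl, rfl, rfl⟩, fun _ => ⟨rfl, rfl⟩⟩)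
  rw [h0 _ hFC, h0 _ hEC] at hmain
  norm_num at hmain
  rw [pvCrossSegEq]
  rw [hmain]
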